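-- pv_equiv track=rewrite | github.com/STRAST-UPM/DCI-SimPy | DCI-SimPy/sim/simulation.py | get_series
-- ===== SOURCE A (Python) =====
-- def get_series(monitor, duration):
--     series = []
--     monitor_sorted = sorted(monitor, key=lambda x: x[0])
--     current = 0
--     idx = 0
--     for t in range(duration + 1):
--         while idx < len(monitor_sorted) and monitor_sorted[idx][0] <= t:
--             current = monitor_sorted[idx][1]
--             idx += 1
--         series.append(current)
--     return series
-- ===== SOURCE B (Python) =====
-- def get_series(monitor, duration):
--     # Segment fill: walk the events once, extending the series in constant blocks.
--     series = []
--     cur = 0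
--     start = 0
--     for time, val in sorted(monitor, key=lambda x: x[0]):
--         if time > duration:
--             break
--         if time > start:
--             series.extend([cur] * (time - start))
--             start = time
--         cur = val
--     series.extend([cur] * (duration + 1 - start))
--     return series
-- ===== Notes on version B (the rewrite author's own statement) =====
-- stated objective: faster
-- what changed: A walks every time step 0..duration advancing an event pointer; B walks the sorted events once and extends the series in constant-value blocks ([cur]*(gap)) between consecutive event times, filling the tail after the last relevant event.
import Mathlib
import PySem

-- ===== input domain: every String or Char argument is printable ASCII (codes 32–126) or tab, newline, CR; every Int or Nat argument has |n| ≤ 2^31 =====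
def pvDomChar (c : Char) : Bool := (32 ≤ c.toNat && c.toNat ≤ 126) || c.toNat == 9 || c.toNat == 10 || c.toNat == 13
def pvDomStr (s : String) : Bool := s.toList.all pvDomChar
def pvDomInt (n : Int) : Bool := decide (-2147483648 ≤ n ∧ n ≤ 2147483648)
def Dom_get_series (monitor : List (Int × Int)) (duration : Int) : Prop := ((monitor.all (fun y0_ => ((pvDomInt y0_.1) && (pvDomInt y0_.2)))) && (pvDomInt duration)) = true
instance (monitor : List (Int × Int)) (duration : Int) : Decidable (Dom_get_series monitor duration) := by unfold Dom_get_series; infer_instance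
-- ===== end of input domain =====

-- B replaces A's per-time-step pointer walk by a single pass over the sorted events that
-- extends the series in constant-value blocks (objective: faster by a constant factor).


-- ===== PORT A =====
-- A's inner while loop: advance over the events whose time is ≤ t, updating current.
-- (The Python indexes monitor_sorted with a running idx; the port carries the same
-- remaining suffix of the sorted list instead of the index — same iterations, same state.)
def pvAdvance (t : Int) : List (Int × Int) → Int → (List (Int × Int)) × Int
  | [], cur => ([], cur)
  | (time, val) :: rs, cur =>
    if time ≤ t then pvAdvance t rs val else ((time, val) :: rs, cur)

def get_series (monitor : List (Int × Int)) (duration : Int) : List Int :=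
  let monitor_sorted := PySem.List.sorted monitor (fun x => x.1)
  ((PySem.List.pyRange 0 (duration + 1) 1).foldl
    (fun st t =>
      let r := pvAdvance t st.2.2 st.2.1
      (st.1 ++ [r.2], r.2, r.1))
    (([] : List Int), (0 : Int), monitor_sorted)).1

-- ===== PORT B =====
-- B's event loop: fill the series in constant blocks between consecutive event times.
-- ([cur] * k in Python is empty for k ≤ 0; List.replicate k.toNat matches that exactly.)
def pvFill (duration : Int) : List (Int × Int) → List Int → Int → Int → List Int
  | [], series, cur, start => series ++ List.replicate (duration + 1 - start).toNat cur
  | (time, val) :: rs, series, cur, start =>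
    if time > duration then series ++ List.replicate (duration + 1 - start).toNat cur
    else if time > start then
      pvFill duration rs (series ++ List.replicate (time - start).toNat cur) val time
    else pvFill duration rs series val start

def get_series_alt (monitor : List (Int × Int)) (duration : Int) : List Int :=
  pvFill duration (PySem.List.sorted monitor (fun x => x.1)) [] 0 0

-- ===== PRECONDITION & SPEC =====
def Spec_get_series (monitor : List (Int × Int)) (duration : Int) (out : List Int) : Prop := out = get_series_alt monitor duration
instance (monitor : List (Int × Int)) (duration : Int) (out : List Int) : Decidable (Spec_get_series monitor duration out) := by unfold Spec_get_series; infer_instance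

-- ===== CLAIM (what is proved, stated in full; the proofs are below) =====
def Claim_equal_get_series : Prop := ∀ (monitor : List (Int × Int)) (duration : Int), Dom_get_series monitor duration → Spec_get_series monitor duration (get_series monitor duration)

-- ===== LEMMAS AND PROOFS =====

-- the value carried by a left fold that keeps the last element's second component
def pvLastOf (xs : List (Int × Int)) (d : Int) : Int := xs.foldl (fun _ p => p.2) d

-- the step-function value at time t: last event with time ≤ t, default 0
def pvSpecAt (L : List (Int × Int)) (t : Int) : Int :=
  pvLastOf (L.filter (fun p => decide (p.1 ≤ t))) 0

lemma pvLastOf_append (xs ys : List (Int × Int)) (d : Int) :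
    pvLastOf (xs ++ ys) d = pvLastOf ys (pvLastOf xs d) := by
  simp [pvLastOf, List.foldl_append]

lemma pvAdvance_eq (t : Int) (rest : List (Int × Int)) (cur : Int) :
    pvAdvance t rest cur =
      (rest.dropWhile (fun p => decide (p.1 ≤ t)),
       pvLastOf (rest.takeWhile (fun p => decide (p.1 ≤ t))) cur) := by
  induction rest generalizing cur with
  | nil => simp [pvAdvance, pvLastOf]
  | cons h rs ih =>
    obtain ⟨time, val⟩ := h
    by_cases hle : time ≤ t
    · simp [pvAdvance, hle, ih, List.takeWhile, List.dropWhile, pvLastOf]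
    · simp [pvAdvance, hle, List.takeWhile, List.dropWhile, pvLastOf]

lemma takeWhile_eq_filter_of_pairwise (t : Int) (L : List (Int × Int))
    (hL : L.Pairwise (fun a b => a.1 ≤ b.1)) :
    L.takeWhile (fun p => decide (p.1 ≤ t)) = L.filter (fun p => decide (p.1 ≤ t)) := by
  induction L with
  | nil => rfl
  | cons h rs ih =>
    rcases List.pairwise_cons.mp hL with ⟨hhead, htail⟩
    by_cases hle : h.1 ≤ t
    · simp [List.takeWhile, List.filter, hle, ih htail]
    · have hrs : rs.filter (fun p => decide (p.1 ≤ t)) = [] := by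
        apply List.filter_eq_nil_iff.mpr
        intro p hp
        have h1 := hhead p hp
        simp only [decide_eq_true_eq]
        omega
      simp [List.takeWhile, List.filter, hle, hrs]

lemma filter_eq_self_of_le (t : Int) (pre : List (Int × Int))
    (h : ∀ p ∈ pre, p.1 ≤ t) :
    pre.filter (fun p => decide (p.1 ≤ t)) = pre := by
  apply List.filter_eq_self.mpr
  intro p hp; simpa using h p hp

lemma map_specAt_const (L pre : List (Int × Int)) (a b : Int)
    (hrest : ∀ t, a ≤ t → t < b → L.filter (fun p => decide (p.1 ≤ t)) = pre) :
    (PySem.List.pyRange a b 1).map (pvSpecAt L) =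
      List.replicate (b - a).toNat (pvLastOf pre 0) := by
  have hmap : (PySem.List.pyRange a b 1).map (pvSpecAt L)
      = (PySem.List.pyRange a b 1).map (fun _ => pvLastOf pre 0) := by
    apply List.map_congr_left
    intro t ht
    rcases (PySem.List.mem_pyRange_one).mp ht with ⟨h1, h2⟩
    simp [pvSpecAt, hrest t h1 h2]
  rw [hmap, List.map_const', PySem.List.length_pyRange_one]

-- A's outer loop equals the pointwise spec, by induction on the remaining time range.
lemma foldA (L : List (Int × Int)) (hL : L.Pairwise (fun a b => a.1 ≤ b.1)) (b : Int) :
    ∀ (n : Nat) (a : Int), (b - a).toNat = n →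
    ∀ (series : List Int) (pre rest : List (Int × Int)),
    L = pre ++ rest → (∀ p ∈ pre, p.1 < a) →
    ((PySem.List.pyRange a b 1).foldl
      (fun st t =>
        let r := pvAdvance t st.2.2 st.2.1
        (st.1 ++ [r.2], r.2, r.1))
      (series, pvLastOf pre 0, rest)).1
      = series ++ (PySem.List.pyRange a b 1).map (pvSpecAt L) := by
  intro n
  induction n with
  | zero =>
    intro a ha series pre rest hsplit hpre
    have hba : b ≤ a := by omega
    simp [PySem.List.pyRange_one_eq_nil hba]
  | succ n ih =>
    intro a ha series pre rest hsplit hpre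
    have hab : a < b := by omega
    have hrestP : rest.Pairwise (fun p q => p.1 ≤ q.1) := by
      subst hsplit; exact (List.pairwise_append.mp hL).2.1
    rw [PySem.List.pyRange_one_cons hab]
    simp only [List.foldl_cons]
    have hadv := pvAdvance_eq a rest (pvLastOf pre 0)
    rw [takeWhile_eq_filter_of_pairwise a rest hrestP] at hadv
    have hcur : pvLastOf (rest.filter (fun p => decide (p.1 ≤ a))) (pvLastOf pre 0)
        = pvSpecAt L a := by
      rw [← pvLastOf_append, pvSpecAt, hsplit, List.filter_append,
        filter_eq_self_of_le a pre (fun p hp => le_of_lt (hpre p hp))]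
    have hsplit' : L = (pre ++ rest.takeWhile (fun p => decide (p.1 ≤ a)))
        ++ rest.dropWhile (fun p => decide (p.1 ≤ a)) := by
      rw [List.append_assoc, List.takeWhile_append_dropWhile]; exact hsplit
    have hpre' : ∀ p ∈ pre ++ rest.takeWhile (fun p => decide (p.1 ≤ a)), p.1 < a + 1 := by
      intro p hp
      rcases List.mem_append.mp hp with h | h
      · have := hpre p h; omega
      · have := List.mem_takeWhile_imp h; simp at this; omega
    have hlast' : pvLastOf (pre ++ rest.takeWhile (fun p => decide (p.1 ≤ a))) 0
        = pvSpecAt L a := by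
      rw [pvLastOf_append, takeWhile_eq_filter_of_pairwise a rest hrestP, hcur]
    have := ih (a + 1) (by omega) (series ++ [pvSpecAt L a])
      (pre ++ rest.takeWhile (fun p => decide (p.1 ≤ a)))
      (rest.dropWhile (fun p => decide (p.1 ≤ a))) hsplit' hpre'
    rw [hlast'] at this
    simp only [hadv, hcur, this]
    simp

-- B's event loop equals the pointwise spec, by induction on the remaining events.
lemma fillB (L : List (Int × Int)) (hL : L.Pairwise (fun a b => a.1 ≤ b.1)) (d : Int) :
    ∀ (rest pre : List (Int × Int)) (series : List Int) (start : Int),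
    L = pre ++ rest → (∀ p ∈ pre, p.1 ≤ start) →
    pvFill d rest series (pvLastOf pre 0) start
      = series ++ (PySem.List.pyRange start (d + 1) 1).map (pvSpecAt L) := by
  intro rest
  induction rest with
  | nil =>
    intro pre series start hsplit hpre
    have hrest : ∀ t, start ≤ t → t < d + 1 → L.filter (fun p => decide (p.1 ≤ t)) = pre := by
      intro t h1 h2
      rw [hsplit]; simp [filter_eq_self_of_le t pre (fun p hp => le_trans (hpre p hp) h1)]
    rw [pvFill, map_specAt_const L pre start (d + 1) hrest]
  | cons h rs ih =>
    intro pre series start hsplit hpre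
    obtain ⟨time, val⟩ := h
    have hrestP : ((time, val) :: rs).Pairwise (fun p q => p.1 ≤ q.1) := by
      subst hsplit; exact (List.pairwise_append.mp hL).2.1
    have hrs : ∀ p ∈ rs, time ≤ p.1 := by
      intro p hp; exact (List.pairwise_cons.mp hrestP).1 p hp
    have hrestfilter : ∀ t : Int, t < time →
        ((time, val) :: rs).filter (fun p => decide (p.1 ≤ t)) = [] := by
      intro t ht
      apply List.filter_eq_nil_iff.mpr
      intro p hp
      simp only [decide_eq_true_eq]
      rcases List.mem_cons.mp hp with h | h
      · subst h; simp; omega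
      · have := hrs p h; omega
    by_cases hdur : time > d
    · have hrest : ∀ t, start ≤ t → t < d + 1 → L.filter (fun p => decide (p.1 ≤ t)) = pre := by
        intro t h1 h2
        rw [hsplit, List.filter_append,
          filter_eq_self_of_le t pre (fun p hp => le_trans (hpre p hp) h1),
          hrestfilter t (by omega)]
        simp
      rw [pvFill, if_pos hdur, map_specAt_const L pre start (d + 1) hrest]
    · rw [pvFill, if_neg hdur]
      have hsplit' : L = (pre ++ [(time, val)]) ++ rs := by
        rw [hsplit]; simp
      have hlast' : pvLastOf (pre ++ [(time, val)]) 0 = val := by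
        rw [pvLastOf_append]; rfl
      by_cases hst : time > start
      · rw [if_pos hst]
        have hpre' : ∀ p ∈ pre ++ [(time, val)], p.1 ≤ time := by
          intro p hp
          rcases List.mem_append.mp hp with h | h
          · have := hpre p h; omega
          · simp at h; subst h; simp
        have := ih (pre ++ [(time, val)])
          (series ++ List.replicate (time - start).toNat (pvLastOf pre 0)) time hsplit' hpre'
        rw [hlast'] at this
        rw [this]
        have hsplitrange : PySem.List.pyRange start (d + 1) 1
            = PySem.List.pyRange start time 1 ++ PySem.List.pyRange time (d + 1) 1 :=
          PySem.List.pyRange_one_append start time (d + 1) (by omega) (by omega)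
        have hrest2 : ∀ t, start ≤ t → t < time → L.filter (fun p => decide (p.1 ≤ t)) = pre := by
          intro t h1 h2
          rw [hsplit, List.filter_append,
            filter_eq_self_of_le t pre (fun p hp => le_trans (hpre p hp) h1),
            hrestfilter t h2]
          simp
        rw [hsplitrange, List.map_append,
          map_specAt_const L pre start time hrest2]
        simp
      · rw [if_neg hst]
        have hpre' : ∀ p ∈ pre ++ [(time, val)], p.1 ≤ start := by
          intro p hp
          rcases List.mem_append.mp hp with h | h
          · exact hpre p h
          · simp at h; subst h; simp; omega
        have := ih (pre ++ [(time, val)]) series start hsplit' hpre'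
        rw [hlast'] at this
        exact this

-- ===== VERDICT (by name: the statement is the Claim_ definition above) =====
theorem get_series_spec : Claim_equal_get_series := by
  unfold Claim_equal_get_series
  intro monitor duration _
  unfold Spec_get_series get_series get_series_alt
  set L := PySem.List.sorted monitor (fun x => x.1) with hLdef
  have hP : L.Pairwise (fun a b => a.1 ≤ b.1) := PySem.List.sorted_pairwise monitor (fun x => x.1)
  have hA := foldA L hP (duration + 1) (duration + 1 - 0).toNat 0 rfl [] [] L rfl
    (by intro p hp; simp at hp)
  have hB := fillB L hP duration L [] [] 0 rfl (by intro p hp; simp at hp)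
  simp only [pvLastOf, List.foldl_nil] at hA hB
  rw [hA, hB]
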